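-- pv_equiv track=rewrite | github.com/Darshan1814/Krishi-Mitra | backend/orders/app.py | get_product_images
-- ===== SOURCE A (Python) =====
-- def get_product_images(query):
--     """Get multiple product images based on query"""
--     query_lower = query.lower()
--
--     if any(word in query_lower for word in ['urea', 'fertilizer', 'npk', 'dap']):
--         return [
--             'https://5.imimg.com/data5/SELLER/Default/2023/1/YH/KN/WX/181565623/urea-fertilizer.jpg',
--             'https://5.imimg.com/data5/SELLER/Default/2022/8/KL/MN/OP/987654321/npk-fertilizer.jpg',
--             'https://5.imimg.com/data5/SELLER/Default/2023/2/AB/CD/EF/123456789/dap-fertilizer.jpg'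
--         ]
--     elif any(word in query_lower for word in ['ddt', 'pesticide', 'insecticide', 'spray', 'killer']):
--         return [
--             'https://5.imimg.com/data5/SELLER/Default/2021/8/YV/ME/GH/6141965/ddt-powder.jpg',
--             'https://5.imimg.com/data5/SELLER/Default/2022/5/PQ/RS/TU/456789123/pesticide-spray.jpg',
--             'https://5.imimg.com/data5/SELLER/Default/2023/3/VW/XY/ZA/789123456/insecticide.jpg'
--         ]
--     elif any(word in query_lower for word in ['seed', 'seeds', 'grain', 'wheat', 'rice']):
--         return [
--             'https://5.imimg.com/data5/SELLER/Default/2022/12/BC/DE/FG/321654987/wheat-seeds.jpg',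
--             'https://5.imimg.com/data5/SELLER/Default/2023/4/HI/JK/LM/654987321/rice-seeds.jpg',
--             'https://5.imimg.com/data5/SELLER/Default/2022/9/NO/PQ/RS/147258369/grain-seeds.jpg'
--         ]
--     elif any(word in query_lower for word in ['tractor', 'machine', 'equipment']):
--         return [
--             'https://5.imimg.com/data5/SELLER/Default/2023/5/TU/VW/XY/258369147/tractor.jpg',
--             'https://5.imimg.com/data5/SELLER/Default/2022/11/ZA/BC/DE/369147258/farm-equipment.jpg'
--         ]
--     else:
--         return ['https://5.imimg.com/data5/SELLER/Default/2023/1/YH/KN/WX/181565623/urea-fertilizer.jpg']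
-- ===== SOURCE B (Python) =====
-- # Flat keyword->category index with min-aggregation instead of a branch chain.
-- _KEYWORD_CATEGORY = {
--     'urea': 0, 'fertilizer': 0, 'npk': 0, 'dap': 0,
--     'ddt': 1, 'pesticide': 1, 'insecticide': 1, 'spray': 1, 'killer': 1,
--     'seed': 2, 'seeds': 2, 'grain': 2, 'wheat': 2, 'rice': 2,
--     'tractor': 3, 'machine': 3, 'equipment': 3,
-- }
--
-- _URLS = [
--     ['https://5.imimg.com/data5/SELLER/Default/2023/1/YH/KN/WX/181565623/urea-fertilizer.jpg',
--      'https://5.imimg.com/data5/SELLER/Default/2022/8/KL/MN/OP/987654321/npk-fertilizer.jpg',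
--      'https://5.imimg.com/data5/SELLER/Default/2023/2/AB/CD/EF/123456789/dap-fertilizer.jpg'],
--     ['https://5.imimg.com/data5/SELLER/Default/2021/8/YV/ME/GH/6141965/ddt-powder.jpg',
--      'https://5.imimg.com/data5/SELLER/Default/2022/5/PQ/RS/TU/456789123/pesticide-spray.jpg',
--      'https://5.imimg.com/data5/SELLER/Default/2023/3/VW/XY/ZA/789123456/insecticide.jpg'],
--     ['https://5.imimg.com/data5/SELLER/Default/2022/12/BC/DE/FG/321654987/wheat-seeds.jpg',
--      'https://5.imimg.com/data5/SELLER/Default/2023/4/HI/JK/LM/654987321/rice-seeds.jpg',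
--      'https://5.imimg.com/data5/SELLER/Default/2022/9/NO/PQ/RS/147258369/grain-seeds.jpg'],
--     ['https://5.imimg.com/data5/SELLER/Default/2023/5/TU/VW/XY/258369147/tractor.jpg',
--      'https://5.imimg.com/data5/SELLER/Default/2022/11/ZA/BC/DE/369147258/farm-equipment.jpg'],
-- ]
--
-- _DEFAULT = ['https://5.imimg.com/data5/SELLER/Default/2023/1/YH/KN/WX/181565623/urea-fertilizer.jpg']
--
--
-- def get_product_images(query):
--     """Get multiple product images based on query (keyword index + min priority)."""
--     query_lower = query.lower()
--     matched = [cat for word, cat in _KEYWORD_CATEGORY.items() if word in query_lower]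
--     if matched:
--         return _URLS[min(matched)]
--     return _DEFAULT
-- ===== Notes on version B (the rewrite author's own statement) =====
-- stated objective: alternative
-- what changed: Replaced the if/elif branch chain by a flat keyword-to-category-priority index: one comprehension collects the priorities of all keywords occurring in the query and the minimum priority selects the URL list (default if no keyword matches).
import Mathlib
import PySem

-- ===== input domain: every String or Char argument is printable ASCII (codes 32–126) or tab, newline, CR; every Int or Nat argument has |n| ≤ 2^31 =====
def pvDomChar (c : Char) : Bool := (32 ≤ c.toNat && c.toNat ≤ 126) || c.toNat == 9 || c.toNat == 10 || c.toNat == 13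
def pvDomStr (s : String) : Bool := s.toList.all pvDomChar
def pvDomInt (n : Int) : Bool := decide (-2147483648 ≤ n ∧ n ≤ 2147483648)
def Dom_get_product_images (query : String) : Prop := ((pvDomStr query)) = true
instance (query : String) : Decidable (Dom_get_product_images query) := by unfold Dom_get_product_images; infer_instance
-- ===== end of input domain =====

-- B replaces A's if/elif chain by a flat keyword->priority index aggregated with min (alternative algorithm, same cost).


-- ===== PORT A =====
def get_product_images (query : String) : List String :=
  let query_lower := PySem.Str.lower query
  if ["urea", "fertilizer", "npk", "dap"].any (fun word => PySem.Str.isIn word query_lower) then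
    ["https://5.imimg.com/data5/SELLER/Default/2023/1/YH/KN/WX/181565623/urea-fertilizer.jpg",
     "https://5.imimg.com/data5/SELLER/Default/2022/8/KL/MN/OP/987654321/npk-fertilizer.jpg",
     "https://5.imimg.com/data5/SELLER/Default/2023/2/AB/CD/EF/123456789/dap-fertilizer.jpg"]
  else if ["ddt", "pesticide", "insecticide", "spray", "killer"].any (fun word => PySem.Str.isIn word query_lower) then
    ["https://5.imimg.com/data5/SELLER/Default/2021/8/YV/ME/GH/6141965/ddt-powder.jpg",
     "https://5.imimg.com/data5/SELLER/Default/2022/5/PQ/RS/TU/456789123/pesticide-spray.jpg",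
     "https://5.imimg.com/data5/SELLER/Default/2023/3/VW/XY/ZA/789123456/insecticide.jpg"]
  else if ["seed", "seeds", "grain", "wheat", "rice"].any (fun word => PySem.Str.isIn word query_lower) then
    ["https://5.imimg.com/data5/SELLER/Default/2022/12/BC/DE/FG/321654987/wheat-seeds.jpg",
     "https://5.imimg.com/data5/SELLER/Default/2023/4/HI/JK/LM/654987321/rice-seeds.jpg",
     "https://5.imimg.com/data5/SELLER/Default/2022/9/NO/PQ/RS/147258369/grain-seeds.jpg"]
  else if ["tractor", "machine", "equipment"].any (fun word => PySem.Str.isIn word query_lower) then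
    ["https://5.imimg.com/data5/SELLER/Default/2023/5/TU/VW/XY/258369147/tractor.jpg",
     "https://5.imimg.com/data5/SELLER/Default/2022/11/ZA/BC/DE/369147258/farm-equipment.jpg"]
  else
    ["https://5.imimg.com/data5/SELLER/Default/2023/1/YH/KN/WX/181565623/urea-fertilizer.jpg"]

-- ===== PORT B =====
-- B: a flat keyword -> category-priority index; the minimum priority of the matching keywords picks the URL list.
def pvKeywordCategory : List (String × Nat) :=
  [("urea", 0), ("fertilizer", 0), ("npk", 0), ("dap", 0),
   ("ddt", 1), ("pesticide", 1), ("insecticide", 1), ("spray", 1), ("killer", 1),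
   ("seed", 2), ("seeds", 2), ("grain", 2), ("wheat", 2), ("rice", 2),
   ("tractor", 3), ("machine", 3), ("equipment", 3)]

def pvUrls : List (List String) :=
  [["https://5.imimg.com/data5/SELLER/Default/2023/1/YH/KN/WX/181565623/urea-fertilizer.jpg",
    "https://5.imimg.com/data5/SELLER/Default/2022/8/KL/MN/OP/987654321/npk-fertilizer.jpg",
    "https://5.imimg.com/data5/SELLER/Default/2023/2/AB/CD/EF/123456789/dap-fertilizer.jpg"],
   ["https://5.imimg.com/data5/SELLER/Default/2021/8/YV/ME/GH/6141965/ddt-powder.jpg",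
    "https://5.imimg.com/data5/SELLER/Default/2022/5/PQ/RS/TU/456789123/pesticide-spray.jpg",
    "https://5.imimg.com/data5/SELLER/Default/2023/3/VW/XY/ZA/789123456/insecticide.jpg"],
   ["https://5.imimg.com/data5/SELLER/Default/2022/12/BC/DE/FG/321654987/wheat-seeds.jpg",
    "https://5.imimg.com/data5/SELLER/Default/2023/4/HI/JK/LM/654987321/rice-seeds.jpg",
    "https://5.imimg.com/data5/SELLER/Default/2022/9/NO/PQ/RS/147258369/grain-seeds.jpg"],
   ["https://5.imimg.com/data5/SELLER/Default/2023/5/TU/VW/XY/258369147/tractor.jpg",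
    "https://5.imimg.com/data5/SELLER/Default/2022/11/ZA/BC/DE/369147258/farm-equipment.jpg"]]

def pvDefault : List String :=
  ["https://5.imimg.com/data5/SELLER/Default/2023/1/YH/KN/WX/181565623/urea-fertilizer.jpg"]

def get_product_images_alt (query : String) : List String :=
  let query_lower := PySem.Str.lower query
  let matched := (pvKeywordCategory.filter
      (fun wc => PySem.Str.isIn wc.1 query_lower)).map Prod.snd
  -- `_URLS[min(matched)]` : min(matched) is always 0..3, so getD [] is exact here
  match PySem.List.min? matched (fun x => x) with
  | some best => pvUrls.getD best []
  | none => pvDefault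

-- ===== PRECONDITION & SPEC =====
def Spec_get_product_images (query : String) (out : List String) : Prop := out = get_product_images_alt query
instance (query : String) (out : List String) : Decidable (Spec_get_product_images query out) := by unfold Spec_get_product_images; infer_instance

-- ===== CLAIM (what is proved, stated in full; the proofs are below) =====
def Claim_equal_get_product_images : Prop := ∀ (query : String), Dom_get_product_images query → Spec_get_product_images query (get_product_images query)

-- ===== LEMMAS AND PROOFS =====

-- fold of `min` starting at a lower bound stays put
theorem pv_foldl_min_of_le (xs : List Nat) (c : Nat) (h : ∀ x ∈ xs, c ≤ x) :
    xs.foldl min c = c := by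
  induction xs with
  | nil => rfl
  | cons x t ih =>
    simp only [List.foldl]
    have hx : c ≤ x := h x (by simp)
    rw [Nat.min_eq_left hx]
    exact ih (fun y hy => h y (by simp [hy]))

theorem pv_min?_head (c : Nat) (xs : List Nat) (h : ∀ x ∈ xs, c ≤ x) :
    PySem.List.min? (c :: xs) (fun x => x) = some c := by
  rw [PySem.List.min?_id_cons]
  rw [pv_foldl_min_of_le xs c h]

-- the per-category slice of the matched list is a constant map over the matching words
theorem pv_grp_eq (ws : List String) (k : Nat) (q : String) :
    ((ws.map (fun w => (w, k))).filter (fun wc => PySem.Str.isIn wc.1 q)).map Prod.snd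
      = (ws.filter (fun w => PySem.Str.isIn w q)).map (fun _ => k) := by
  induction ws with
  | nil => rfl
  | cons w t ih =>
    by_cases h : PySem.Str.isIn w q = true
    · rw [List.map_cons, List.filter_cons, List.filter_cons, if_pos h, if_pos h,
          List.map_cons, List.map_cons, ih]
    · rw [List.map_cons, List.filter_cons, List.filter_cons, if_neg h, if_neg h, ih]

theorem pv_filter_ne_nil_any (p : String → Bool) (l : List String)
    (h : l.filter p ≠ []) : l.any p = true := by
  rcases List.exists_mem_of_ne_nil _ h with ⟨x, hx⟩
  rcases List.mem_filter.mp hx with ⟨hm, hp⟩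
  exact List.any_eq_true.mpr ⟨x, hm, hp⟩

theorem pv_filter_nil_any (p : String → Bool) (l : List String)
    (h : l.filter p = []) : l.any p = false := by
  rw [List.any_eq_false]
  intro x hx hp
  have := List.filter_eq_nil_iff.mp h x hx
  exact this hp

-- ===== VERDICT (by name: the statement is the Claim_ definition above) =====
theorem get_product_images_spec : Claim_equal_get_product_images := by
  intro query _
  unfold Spec_get_product_images get_product_images get_product_images_alt
  set ql := PySem.Str.lower query with hql
  have hflat : pvKeywordCategory
      = (["urea", "fertilizer", "npk", "dap"].map (fun w => (w, 0)))
        ++ (["ddt", "pesticide", "insecticide", "spray", "killer"].map (fun w => (w, 1)))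
        ++ (["seed", "seeds", "grain", "wheat", "rice"].map (fun w => (w, 2)))
        ++ (["tractor", "machine", "equipment"].map (fun w => (w, 3))) := rfl
  rw [hflat]
  simp only [List.filter_append, List.map_append, pv_grp_eq]
  set p := fun w => PySem.Str.isIn w ql with hp
  set m0 := (["urea", "fertilizer", "npk", "dap"].filter p) with hm0
  set m1 := (["ddt", "pesticide", "insecticide", "spray", "killer"].filter p) with hm1
  set m2 := (["seed", "seeds", "grain", "wheat", "rice"].filter p) with hm2
  set m3 := (["tractor", "machine", "equipment"].filter p) with hm3
  rcases hc0 : m0 with _ | ⟨x0, t0⟩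
  · rcases hc1 : m1 with _ | ⟨x1, t1⟩
    · rcases hc2 : m2 with _ | ⟨x2, t2⟩
      · rcases hc3 : m3 with _ | ⟨x3, t3⟩
        · -- nothing matches
          rw [pv_filter_nil_any p _ (hm0 ▸ hc0), pv_filter_nil_any p _ (hm1 ▸ hc1),
              pv_filter_nil_any p _ (hm2 ▸ hc2), pv_filter_nil_any p _ (hm3 ▸ hc3)]
          simp [PySem.List.min?, pvDefault]
        · -- category 3 is the best match
          rw [pv_filter_nil_any p _ (hm0 ▸ hc0), pv_filter_nil_any p _ (hm1 ▸ hc1),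
              pv_filter_nil_any p _ (hm2 ▸ hc2),
              pv_filter_ne_nil_any p _ (by rw [← hm3, hc3]; simp)]
          simp only [List.map_nil, List.map_cons, List.nil_append]
          rw [pv_min?_head 3 _ (by intro x hx; simp at hx; omega)]
          simp [pvUrls]
      · -- category 2 is the best match
        rw [pv_filter_nil_any p _ (hm0 ▸ hc0), pv_filter_nil_any p _ (hm1 ▸ hc1),
            pv_filter_ne_nil_any p _ (by rw [← hm2, hc2]; simp)]
        simp only [List.map_nil, List.map_cons, List.nil_append, List.cons_append]
        rw [pv_min?_head 2 _ (by intro x hx; simp at hx; rcases hx with h | h <;> omega)]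
        simp [pvUrls]
    · -- category 1 is the best match
      rw [pv_filter_nil_any p _ (hm0 ▸ hc0),
          pv_filter_ne_nil_any p _ (by rw [← hm1, hc1]; simp)]
      simp only [List.map_nil, List.map_cons, List.nil_append, List.cons_append,
        List.append_assoc]
      rw [pv_min?_head 1 _ (by intro x hx; simp at hx; rcases hx with h | h | h <;> omega)]
      simp [pvUrls]
  · -- category 0 is the best match
    rw [pv_filter_ne_nil_any p _ (by rw [← hm0, hc0]; simp)]
    simp only [List.map_cons, List.cons_append, List.append_assoc]
    rw [pv_min?_head 0 _ (by intro x hx; exact Nat.zero_le x)]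
    simp [pvUrls]
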